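-- pv_equiv track=rewrite | github.com/underhood31/Reddit-Flair-Detector | process_data.py | simplifyText
-- ===== SOURCE A (Python) =====
-- import string
--
-- def simplifyText(s):
--     toRet=[]
--     for i in s:
--         for c in string.punctuation:
--             i= i.replace(c," ")
--             i=i.lower()
--         toRet.append(i)
--     return toRet
-- ===== SOURCE B (Python) =====
-- def _cleanChar(c):
--     o = ord(c)
--     if 33 <= o <= 47 or 58 <= o <= 64 or 91 <= o <= 96 or 123 <= o <= 126:
--         return ' '
--     if 65 <= o <= 90:
--         return chr(o + 32)
--     return c
--
-- def simplifyText(s):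
--     return [''.join(map(_cleanChar, i)) for i in s]
-- ===== Notes on version B (the rewrite author's own statement) =====
-- stated objective: faster
-- what changed: Replaces A's 32 repeated whole-string replace-and-lower passes per string with a single character-level pass that classifies each character by its ASCII code ranges (punctuation ranges become a space, A-Z becomes code+32).
import Mathlib
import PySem

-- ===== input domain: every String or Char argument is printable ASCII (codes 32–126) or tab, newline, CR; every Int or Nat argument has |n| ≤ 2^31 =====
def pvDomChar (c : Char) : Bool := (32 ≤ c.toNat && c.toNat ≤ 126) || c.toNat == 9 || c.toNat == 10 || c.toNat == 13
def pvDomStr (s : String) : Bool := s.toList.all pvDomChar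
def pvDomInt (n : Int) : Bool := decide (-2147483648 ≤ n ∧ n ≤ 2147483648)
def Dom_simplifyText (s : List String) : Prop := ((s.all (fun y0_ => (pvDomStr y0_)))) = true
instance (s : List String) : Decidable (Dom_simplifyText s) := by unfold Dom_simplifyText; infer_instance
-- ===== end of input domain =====

-- B replaces A's 32 repeated whole-string replace+lower scans per string by one char-level pass
-- that classifies each character by its ASCII-code range (punctuation ranges → ' ', 'A'..'Z' → code+32).

-- ===== PORT A =====
-- string.punctuation, as its list of characters (A iterates over its characters)
def pvPunct : List Char :=
  ['!', '"', '#', '$', '%', '&', '\'', '(', ')', '*', '+', ',', '-', '.', '/',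
   ':', ';', '<', '=', '>', '?', '@', '[', '\\', ']', '^', '_', '`', '{', '|', '}', '~']

def simplifyText (s : List String) : List String :=
  s.foldl (fun toRet i =>
    toRet ++ [String.ofList (pvPunct.foldl
      (fun i c => PySem.Chars.lower (PySem.Chars.replace i [c] [' '])) i.toList)]) []

-- ===== PORT B =====
-- _cleanChar: ord-based range tests; chr(o+32) is Char.ofNat (exact, codes stay < 0xD800 here)
def pvCleanChar (c : Char) : Char :=
  let o := c.toNat
  if (33 ≤ o ∧ o ≤ 47) ∨ (58 ≤ o ∧ o ≤ 64) ∨ (91 ≤ o ∧ o ≤ 96) ∨ (123 ≤ o ∧ o ≤ 126) then ' '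
  else if 65 ≤ o ∧ o ≤ 90 then Char.ofNat (o + 32)
  else c

def simplifyText_alt (s : List String) : List String :=
  s.map (fun i => String.ofList (i.toList.map pvCleanChar))

-- ===== PRECONDITION & SPEC =====
def Spec_simplifyText (s : List String) (out : List String) : Prop := out = simplifyText_alt s
instance (s : List String) (out : List String) : Decidable (Spec_simplifyText s out) := by unfold Spec_simplifyText; infer_instance

-- ===== CLAIM (what is proved, stated in full; the proofs are below) =====
def Claim_equal_simplifyText : Prop := ∀ (s : List String), Dom_simplifyText s → Spec_simplifyText s (simplifyText s)

-- ===== LEMMAS AND PROOFS =====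

theorem pvUpper_bounds (c : Char) (h : PySem.Chars.isupper c = true) :
    65 ≤ c.toNat ∧ c.toNat ≤ 90 := by
  simp [PySem.Chars.isupper, Char.le_def] at h; exact h

theorem pvToNat_lowerChar_of_upper (c : Char) (h : PySem.Chars.isupper c = true) :
    (PySem.Chars.lowerChar c).toNat = c.toNat + 32 := by
  have hb := pvUpper_bounds c h
  have hlt : c.toNat + 32 < 55296 := by omega
  rw [show PySem.Chars.lowerChar c = Char.ofNat (c.toNat + 32) by
    simp [PySem.Chars.lowerChar, h]]
  generalize hn : c.toNat + 32 = n at hlt ⊢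
  simp [Char.ofNat, Nat.isValidChar, hlt, Char.toNat, Char.ofNatAux]

theorem pvLowerChar_of_not_upper (c : Char) (h : PySem.Chars.isupper c = false) :
    PySem.Chars.lowerChar c = c := by
  simp [PySem.Chars.lowerChar, h]

theorem pvNot_upper_lowerChar (c : Char) :
    PySem.Chars.isupper (PySem.Chars.lowerChar c) = false := by
  cases hu : PySem.Chars.isupper c with
  | true =>
    cases hd : PySem.Chars.isupper (PySem.Chars.lowerChar c) with
    | false => rfl
    | true =>
      exfalso
      have h1 := pvToNat_lowerChar_of_upper c hu
      have h2 := pvUpper_bounds c hu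
      have h3 := pvUpper_bounds _ hd
      omega
  | false =>
    rw [pvLowerChar_of_not_upper c hu]; exact hu

theorem pvLower_idem (c : Char) :
    PySem.Chars.lowerChar (PySem.Chars.lowerChar c) = PySem.Chars.lowerChar c :=
  pvLowerChar_of_not_upper _ (pvNot_upper_lowerChar c)

theorem pvPunct_fix : ∀ p ∈ pvPunct, PySem.Chars.lowerChar p = p := by
  intro p hp
  fin_cases hp <;> decide

theorem pvPunct_not_lowercase : ∀ q ∈ pvPunct, ¬(97 ≤ q.toNat ∧ q.toNat ≤ 122) := by
  intro q hq
  fin_cases hq <;> decide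

theorem pvLowerChar_mem_punct (x : Char) (h : PySem.Chars.lowerChar x ∈ pvPunct) :
    PySem.Chars.lowerChar x = x := by
  cases hu : PySem.Chars.isupper x with
  | true =>
    exfalso
    have h1 := pvToNat_lowerChar_of_upper x hu
    have h2 := pvUpper_bounds x hu
    exact pvPunct_not_lowercase _ h ⟨by omega, by omega⟩
  | false => exact pvLowerChar_of_not_upper x hu

theorem pvSpace_lower : PySem.Chars.lowerChar ' ' = ' ' := by decide

theorem pvSpace_not_punct : (' ' : Char) ∉ pvPunct := by
  simp [pvPunct]

-- the per-character effect of A's loop over a nonempty list of punctuation characters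
theorem pvCharFold (P : List Char) : ∀ (p : Char),
    (∀ q ∈ p :: P, q ∈ pvPunct) → ∀ x : Char,
    (p :: P).foldl (fun y q => PySem.Chars.lowerChar (if y = q then ' ' else y)) x
      = if x ∈ p :: P then ' ' else PySem.Chars.lowerChar x := by
  induction P with
  | nil =>
    intro p _ x
    simp only [List.foldl_cons, List.foldl_nil]
    by_cases hx : x = p
    · rw [if_pos hx, pvSpace_lower, if_pos (List.mem_cons.mpr (Or.inl hx))]
    · rw [if_neg hx, if_neg (by simpa using hx)]
  | cons q P ih =>
    intro p hP x
    have htail : ∀ r ∈ q :: P, r ∈ pvPunct := fun r hr => hP r (List.mem_cons_of_mem _ hr)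
    have hstep : (p :: q :: P).foldl (fun y r => PySem.Chars.lowerChar (if y = r then ' ' else y)) x
        = (q :: P).foldl (fun y r => PySem.Chars.lowerChar (if y = r then ' ' else y))
            (PySem.Chars.lowerChar (if x = p then ' ' else x)) := rfl
    by_cases hx : x = p
    · rw [hstep, if_pos hx, pvSpace_lower, ih q htail ' ']
      have h4 : (' ' : Char) ∉ q :: P := fun hc => pvSpace_not_punct (htail _ hc)
      rw [if_neg h4, pvSpace_lower, if_pos (List.mem_cons.mpr (Or.inl hx))]
    · rw [hstep, if_neg hx, ih q htail (PySem.Chars.lowerChar x)]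
      by_cases hm : PySem.Chars.lowerChar x ∈ q :: P
      · rw [if_pos hm]
        have hx2 : PySem.Chars.lowerChar x = x := pvLowerChar_mem_punct x (htail _ hm)
        rw [hx2] at hm
        rw [if_pos (List.mem_cons_of_mem _ hm)]
      · have hxm : x ∉ q :: P := fun hxmem => by
          rw [pvPunct_fix x (htail x hxmem)] at hm; exact hm hxmem
        rw [if_neg hm, pvLower_idem]
        have hout : x ∉ p :: q :: P := by
          intro hc; rcases List.mem_cons.mp hc with h | h
          · exact hx h
          · exact hxm h
        rw [if_neg hout]

theorem pvGo_nil (c r : Char) (fuel : Nat) (acc : List Char) :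
    PySem.Chars.replace.go [c] [r] fuel [] acc = acc.reverse := by
  cases fuel <;> simp [PySem.Chars.replace.go]

theorem pvGo_cons (c r x : Char) (t acc : List Char) (fuel : Nat) :
    PySem.Chars.replace.go [c] [r] (fuel+1) (x::t) acc
    = if x = c then PySem.Chars.replace.go [c] [r] fuel t (r::acc)
      else PySem.Chars.replace.go [c] [r] fuel t (x::acc) := by
  simp [PySem.Chars.replace.go, List.isPrefixOf]
  split_ifs <;> simp_all

theorem pvGo_single (c r : Char) : ∀ (fuel : Nat) (l acc : List Char), l.length ≤ fuel →
    PySem.Chars.replace.go [c] [r] fuel l acc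
      = acc.reverse ++ l.map (fun x => if x = c then r else x) := by
  intro fuel
  induction fuel with
  | zero =>
    intro l acc h
    have : l = [] := List.eq_nil_of_length_eq_zero (Nat.le_zero.mp h)
    subst this; simp [pvGo_nil]
  | succ n ih =>
    intro l acc h
    cases l with
    | nil => simp [pvGo_nil]
    | cons x t =>
      rw [pvGo_cons]
      by_cases hx : x = c
      · rw [if_pos hx, ih t (r::acc) (by simpa using Nat.lt_succ_iff.mp (by simpa using h))]
        simp [hx]
      · rw [if_neg hx, ih t (x::acc) (by simpa using Nat.lt_succ_iff.mp (by simpa using h))]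
        simp [hx]

theorem pvReplace_single (c r : Char) (l : List Char) :
    PySem.Chars.replace l [c] [r] = l.map (fun x => if x = c then r else x) := by
  rw [PySem.Chars.replace]
  simp [pvGo_single c r l.length l [] le_rfl]

theorem pvLower_replace (cs : List Char) (c : Char) :
    PySem.Chars.lower (PySem.Chars.replace cs [c] [' '])
      = cs.map (fun x => PySem.Chars.lowerChar (if x = c then ' ' else x)) := by
  rw [pvReplace_single]
  simp [PySem.Chars.lower, List.map_map, Function.comp]

theorem pvFoldl_map_comm (P : List Char) : ∀ (cs : List Char),
    P.foldl (fun cs p => cs.map (fun x => PySem.Chars.lowerChar (if x = p then ' ' else x))) cs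
      = cs.map (fun x => P.foldl (fun y p => PySem.Chars.lowerChar (if y = p then ' ' else y)) x) := by
  induction P with
  | nil => intro cs; simp
  | cons p P ih =>
    intro cs
    simp only [List.foldl_cons]
    rw [ih, List.map_map]
    rfl

-- A's whole punctuation loop acts on each character independently
theorem pvPerString (l : List Char) :
    pvPunct.foldl (fun i c => PySem.Chars.lower (PySem.Chars.replace i [c] [' '])) l
      = l.map (fun c => if c ∈ pvPunct then ' ' else PySem.Chars.lowerChar c) := by
  simp only [pvLower_replace]
  rw [pvFoldl_map_comm]
  apply List.map_congr_left
  intro x _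
  have h : ∀ q ∈ pvPunct, q ∈ pvPunct := fun q hq => hq
  unfold pvPunct at h ⊢
  exact pvCharFold _ _ h x

-- A's per-character action equals B's code-range classification, checked over all 127 low codes
set_option maxRecDepth 10000 in
theorem pvChar_eq_low : ∀ n ∈ List.range 127,
    (if Char.ofNat n ∈ pvPunct then ' ' else PySem.Chars.lowerChar (Char.ofNat n))
      = pvCleanChar (Char.ofNat n) := by decide

theorem pvChar_eq (c : Char) (h : pvDomChar c = true) :
    (if c ∈ pvPunct then ' ' else PySem.Chars.lowerChar c) = pvCleanChar c := by
  have hlt : c.toNat < 127 := by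
    unfold pvDomChar at h
    simp only [Bool.or_eq_true, Bool.and_eq_true, decide_eq_true_eq, beq_iff_eq,
      Nat.le_iff_lt_or_eq] at h
    omega
  have := pvChar_eq_low c.toNat (List.mem_range.mpr hlt)
  rwa [Char.ofNat_toNat] at this

-- ===== VERDICT (by name: the statement is the Claim_ definition above) =====
theorem simplifyText_spec : Claim_equal_simplifyText := by
  intro s hDom
  unfold Spec_simplifyText simplifyText simplifyText_alt
  rw [PySem.List.foldl_append_singleton_eq_map
    (fun i => String.ofList (pvPunct.foldl
      (fun i c => PySem.Chars.lower (PySem.Chars.replace i [c] [' '])) i.toList)) s []]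
  simp only [List.nil_append]
  apply List.map_congr_left
  intro i hi
  refine congrArg String.ofList ?_
  rw [pvPerString]
  apply List.map_congr_left
  intro c hc
  have hs : pvDomStr i = true := by
    have := (List.all_eq_true.mp hDom) i hi
    simpa using this
  exact pvChar_eq c (List.all_eq_true.mp hs c hc)
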